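-- pv_equiv track=rewrite | github.com/kevinmarquesp/advent-of-code | game/2023/chalenge-03/main.py | get_line_numbers_index_list
-- ===== SOURCE A (Python) =====
-- def get_line_numbers_index_list(line: str) -> list[tuple]:
--     numbers_index = []
--
--     current_number_indexes_buffer = []
--     already_registered_count = 0
--
--     for pos, char in enumerate(line):
--
--         if char.isdigit():
--             current_number_indexes_buffer.append(pos)
--             already_registered_count += 1
--
--         elif already_registered_count > 0:
--             first_num = current_number_indexes_buffer[0]
--             last_num = current_number_indexes_buffer[-1]
--
--             current_number_indexes_buffer = []
--             already_registered_count = 0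
--
--             numbers_index.append((first_num, last_num))
--
--     if already_registered_count > 0:
--         first_num = current_number_indexes_buffer[0]
--         last_num = current_number_indexes_buffer[-1]
--
--         numbers_index.append((first_num, last_num))
--
--     return numbers_index
-- ===== SOURCE B (Python) =====
-- def get_line_numbers_index_list(line: str) -> list[tuple]:
--     numbers_index = []
--     i = 0
--     n = len(line)
--     while i < n:
--         if line[i].isdigit():
--             j = i
--             while j + 1 < n and line[j + 1].isdigit():
--                 j += 1
--             numbers_index.append((i, j))
--             i = j + 1
--         else:
--             i += 1
--     return numbers_index
-- ===== Notes on version B (the rewrite author's own statement) =====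
-- stated objective: simpler
-- what changed: Replaced the buffer-list/counter accumulation with post-loop flush by a run-skipping index scan: on meeting a digit it advances to the end of the run and appends (start, end) directly, so no buffer, no counter and no trailing flush are needed.
import Mathlib
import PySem

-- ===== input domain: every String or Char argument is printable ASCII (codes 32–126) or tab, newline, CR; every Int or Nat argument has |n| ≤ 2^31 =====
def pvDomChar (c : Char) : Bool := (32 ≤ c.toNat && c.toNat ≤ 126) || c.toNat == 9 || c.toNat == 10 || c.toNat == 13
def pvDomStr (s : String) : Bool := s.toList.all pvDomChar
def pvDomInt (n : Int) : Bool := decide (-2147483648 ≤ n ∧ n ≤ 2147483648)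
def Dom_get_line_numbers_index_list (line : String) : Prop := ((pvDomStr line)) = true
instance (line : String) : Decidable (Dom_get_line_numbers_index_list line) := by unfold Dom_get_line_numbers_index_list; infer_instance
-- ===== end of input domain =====

-- B replaces A's buffer-list/counter accumulation (and its post-loop flush) by a run-skipping
-- index scan that appends (start, end) of each digit run directly: simpler, no buffer state.

-- ===== PORT A =====
-- one step of A's for-loop over enumerate(line); state = (numbers_index, buffer, count)
def pvStepA (st : List (Int × Int) × List Int × Int) (pc : Int × Char) :
    List (Int × Int) × List Int × Int :=
  if PySem.Chars.isdigit pc.2 then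
    (st.1, st.2.1 ++ [pc.1], st.2.2 + 1)
  else if 0 < st.2.2 then
    -- buffer[0] / buffer[-1]; guarded by count > 0, so the buffer is never empty here
    (st.1 ++ [(PySem.List.pyGetD st.2.1 0 0, PySem.List.pyGetD st.2.1 (-1) 0)], [], 0)
  else st

def get_line_numbers_index_list (line : String) : List (Int × Int) :=
  let st := (PySem.List.enumerate line.toList 0).foldl pvStepA ([], [], 0)
  if 0 < st.2.2 then
    st.1 ++ [(PySem.List.pyGetD st.2.1 0 0, PySem.List.pyGetD st.2.1 (-1) 0)]
  else st.1

-- ===== PORT B =====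
-- B's outer while-loop; the inner while-loop that finds the run end is the takeWhile length
def pvAltGo : List Char → Int → List (Int × Int)
  | [], _ => []
  | c :: rest, i =>
    if PySem.Chars.isdigit c then
      let k := (rest.takeWhile PySem.Chars.isdigit).length
      (i, i + k) :: pvAltGo (rest.drop k) (i + k + 1)
    else pvAltGo rest (i + 1)
termination_by cs _ => cs.length
decreasing_by
  · have := (rest.takeWhile_sublist PySem.Chars.isdigit).length_le
    simp only [List.length_drop, List.length_cons]
    omega
  · simp

def get_line_numbers_index_list_alt (line : String) : List (Int × Int) :=
  pvAltGo line.toList 0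

-- ===== PRECONDITION & SPEC =====
def Spec_get_line_numbers_index_list (line : String) (out : List (Int × Int)) : Prop := out = get_line_numbers_index_list_alt line
instance (line : String) (out : List (Int × Int)) : Decidable (Spec_get_line_numbers_index_list line out) := by unfold Spec_get_line_numbers_index_list; infer_instance

-- ===== CLAIM (what is proved, stated in full; the proofs are below) =====
def Claim_equal_get_line_numbers_index_list : Prop := ∀ (line : String), Dom_get_line_numbers_index_list line → Spec_get_line_numbers_index_list line (get_line_numbers_index_list line)

-- ===== LEMMAS AND PROOFS =====

-- A's trailing flush, applied to the loop state
def pvFinish (st : List (Int × Int) × List Int × Int) : List (Int × Int) :=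
  if 0 < st.2.2 then
    st.1 ++ [(PySem.List.pyGetD st.2.1 0 0, PySem.List.pyGetD st.2.1 (-1) 0)]
  else st.1

lemma pvAltGo_nil (i : Int) : pvAltGo [] i = [] := by
  rw [pvAltGo.eq_def]

lemma pvAltGo_cons (c : Char) (rest : List Char) (i : Int) :
    pvAltGo (c :: rest) i =
      if PySem.Chars.isdigit c then
        (i, i + ((rest.takeWhile PySem.Chars.isdigit).length : Int)) ::
          pvAltGo (rest.drop (rest.takeWhile PySem.Chars.isdigit).length)
            (i + ((rest.takeWhile PySem.Chars.isdigit).length : Int) + 1)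
      else pvAltGo rest (i + 1) := by
  rw [pvAltGo.eq_def]

lemma pvGetD_zero_append (buf : List Int) (x d : Int) (h : buf ≠ []) :
    PySem.List.pyGetD (buf ++ [x]) 0 d = PySem.List.pyGetD buf 0 d := by
  cases buf with
  | nil => exact absurd rfl h
  | cons b bs =>
    simp [PySem.List.pyGetD, PySem.List.pyGet?, PySem.List.pyIdx?,
      show (0:Int) ≤ (bs.length:Int) + 1 by positivity]

lemma pvGetD_neg_one_append (buf : List Int) (x d : Int) :
    PySem.List.pyGetD (buf ++ [x]) (-1) d = x := by
  simp [PySem.List.pyGetD, PySem.List.pyGet?, PySem.List.pyIdx?]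

-- the loop/flush invariant: with an empty buffer A computes B's result; with a pending
-- run (first element f, last element i-1) A first closes that run at the end of the
-- leading digit block and then computes B's result for the remainder.
lemma pvKey (cs : List Char) : ∀ (i : Int) (acc : List (Int × Int)),
    (pvFinish ((PySem.List.enumerate cs i).foldl pvStepA (acc, [], 0)) = acc ++ pvAltGo cs i)
    ∧ (∀ (buf : List Int) (cnt f : Int), 0 < cnt → buf ≠ [] →
        PySem.List.pyGetD buf 0 0 = f → PySem.List.pyGetD buf (-1) 0 = i - 1 →
        pvFinish ((PySem.List.enumerate cs i).foldl pvStepA (acc, buf, cnt)) =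
          acc ++ (f, i - 1 + ((cs.takeWhile PySem.Chars.isdigit).length : Int)) ::
            pvAltGo (cs.drop (cs.takeWhile PySem.Chars.isdigit).length)
              (i + ((cs.takeWhile PySem.Chars.isdigit).length : Int))) := by
  induction cs with
  | nil =>
    intro i acc
    constructor
    · simp [PySem.List.enumerate, pvFinish, pvAltGo_nil]
    · intro buf cnt f hc hb h0 h1
      simp [PySem.List.enumerate, pvFinish, pvAltGo_nil, hc, h0, h1]
  | cons c rest ih =>
    intro i acc
    by_cases hd : PySem.Chars.isdigit c = true
    · constructor
      · -- empty state meets a digit: a run starts with buffer [i]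
        rw [PySem.List.enumerate_cons, List.foldl_cons]
        have hstep : pvStepA (acc, [], 0) (i, c) = (acc, [i], 1) := by
          simp [pvStepA, hd]
        rw [hstep]
        have h1 := (ih (i + 1) acc).2 [i] 1 i (by norm_num) (by simp)
          (by simp [PySem.List.pyGetD, PySem.List.pyGet?, PySem.List.pyIdx?])
          (by simp [PySem.List.pyGetD, PySem.List.pyGet?, PySem.List.pyIdx?])
        rw [h1, pvAltGo_cons, if_pos hd]
        have e1 : i + 1 - 1 + ((rest.takeWhile PySem.Chars.isdigit).length : Int)
            = i + ((rest.takeWhile PySem.Chars.isdigit).length : Int) := by ring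
        have e2 : i + 1 + ((rest.takeWhile PySem.Chars.isdigit).length : Int)
            = i + ((rest.takeWhile PySem.Chars.isdigit).length : Int) + 1 := by ring
        rw [e1, e2]
      · -- pending run meets a digit: the buffer is extended by i
        intro buf cnt f hc hb h0 h1
        rw [PySem.List.enumerate_cons, List.foldl_cons]
        have hstep : pvStepA (acc, buf, cnt) (i, c) = (acc, buf ++ [i], cnt + 1) := by
          simp [pvStepA, hd]
        rw [hstep]
        have h2 := (ih (i + 1) acc).2 (buf ++ [i]) (cnt + 1) f (by omega) (by simp)
          (by rw [pvGetD_zero_append buf i 0 hb]; exact h0)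
          (by rw [pvGetD_neg_one_append]; ring)
        rw [h2]
        simp only [List.takeWhile_cons, hd, if_pos, List.length_cons, List.drop_succ_cons]
        have e1 : i + 1 - 1 + ((rest.takeWhile PySem.Chars.isdigit).length : Int)
            = i - 1 + (((rest.takeWhile PySem.Chars.isdigit).length + 1 : Nat) : Int) := by
          push_cast; ring
        have e2 : i + 1 + ((rest.takeWhile PySem.Chars.isdigit).length : Int)
            = i + (((rest.takeWhile PySem.Chars.isdigit).length + 1 : Nat) : Int) := by
          push_cast; ring
        rw [e1, e2]
    · have hd' : PySem.Chars.isdigit c = false := by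
        cases h : PySem.Chars.isdigit c
        · rfl
        · exact absurd h hd
      constructor
      · -- empty state meets a non-digit: nothing happens
        rw [PySem.List.enumerate_cons, List.foldl_cons]
        have hstep : pvStepA (acc, [], 0) (i, c) = (acc, [], 0) := by
          simp [pvStepA, hd']
        rw [hstep, (ih (i + 1) acc).1, pvAltGo_cons]
        simp [hd']
      · -- pending run meets a non-digit: A flushes (f, i - 1), B's skip step agrees
        intro buf cnt f hc hb h0 h1
        rw [PySem.List.enumerate_cons, List.foldl_cons]
        have hstep : pvStepA (acc, buf, cnt) (i, c) = (acc ++ [(f, i - 1)], [], 0) := by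
          simp [pvStepA, hd', hc, h0, h1]
        rw [hstep, (ih (i + 1) (acc ++ [(f, i - 1)])).1]
        simp [hd', pvAltGo_cons]

-- ===== VERDICT (by name: the statement is the Claim_ definition above) =====
theorem get_line_numbers_index_list_spec : Claim_equal_get_line_numbers_index_list := by
  intro line _
  show get_line_numbers_index_list line = get_line_numbers_index_list_alt line
  have h := (pvKey line.toList 0 []).1
  simpa [pvFinish, get_line_numbers_index_list, get_line_numbers_index_list_alt] using h
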